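-- pv_equiv track=rewrite | github.com/thalida/adventofcode | 2022/day-06/part2.py | process
-- ===== SOURCE A (Python) =====
-- def process(stream):
--   marker_size = 14
--   marker_pos = 0
--   for i in range(marker_size, len(stream)):
--     partiton = set(stream[i-marker_size:i])
--     if len(partiton) == marker_size:
--       marker_pos = i
--       break
--
--   return marker_pos
-- ===== SOURCE B (Python) =====
-- def process(stream):
--   marker_size = 14
--   last_seen = {}
--   start = 0
--   for i, c in enumerate(stream):
--     j = last_seen.get(c, -1)
--     if j >= start:
--       start = j + 1
--     last_seen[c] = i
--     if i - start + 1 == marker_size: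
--       return i + 1
--   return 0
-- ===== Notes on version B (the rewrite author's own statement) =====
-- stated objective: faster
-- what changed: Replaces the rebuild-a-set-per-position scan (a fresh 14-char set at every index) with a single sliding-window pass that keeps each character's last-seen index in a dict and advances the window's left edge, returning at the first full distinct window.
-- intended difference: On streams whose only all-distinct 14-char window is the one ending exactly at the end of the stream, A returns 0 (its range stops at len(stream)-1 and never examines the final window) while B returns len(stream), the position of that marker, which is the intended answer for the puzzle. — e.g. on process("abcdefghijklmn"): A returns 0, B returns 14
import Mathlib
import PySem

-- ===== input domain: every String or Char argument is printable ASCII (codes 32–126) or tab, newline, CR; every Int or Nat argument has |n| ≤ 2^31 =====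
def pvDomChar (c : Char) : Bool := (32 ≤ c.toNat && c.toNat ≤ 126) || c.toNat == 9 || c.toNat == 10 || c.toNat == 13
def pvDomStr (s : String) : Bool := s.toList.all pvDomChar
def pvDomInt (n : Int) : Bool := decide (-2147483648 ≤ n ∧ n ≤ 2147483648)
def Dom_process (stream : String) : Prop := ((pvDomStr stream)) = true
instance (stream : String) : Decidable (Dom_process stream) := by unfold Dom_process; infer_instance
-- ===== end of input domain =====

-- B replaces A's rebuild-a-set-per-position scan by a single sliding-window pass
-- (last-seen dict + moving left edge); on the corner where A's range misses the
-- final window (D_process below) B returns the intended marker position.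

-- ===== PORT A =====
-- for i in range(14, len(stream)): if len(set(stream[i-14:i])) == 14: marker_pos = i; break
def processLoop (cs : List Char) : List Int → Int
  | [] => 0
  | i :: rest =>
    if (PySem.Set.ofList (PySem.List.slice cs (some (i - 14)) (some i))).length = 14 then i
    else processLoop cs rest

def process (stream : String) : Int :=
  processLoop stream.toList (PySem.List.pyRange 14 (PySem.Str.len stream) 1)

-- ===== PORT B =====
-- for i, c in enumerate(stream): sliding window with last_seen dict and left edge `start`
def processAltLoop (cs : List Char) (i : Nat) (start : Int) (seen : PySem.Dict Char Int) : Int :=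
  match cs with
  | [] => 0
  | c :: rest =>
    let j := seen.getD c (-1)
    let start' := if start ≤ j then j + 1 else start
    let seen' := seen.insert c (i : Int)
    if (i : Int) - start' + 1 = 14 then (i : Int) + 1
    else processAltLoop rest (i + 1) start' seen'

def process_alt (stream : String) : Int :=
  processAltLoop stream.toList 0 0 PySem.Dict.empty

-- ===== PRECONDITION & SPEC =====
-- the (up to) 14-character window of cs that ends at position e
def winD (cs : List Char) (e : Nat) : List Char := (cs.take e).drop (e - 14)

-- On streams whose only all-distinct 14-char window is the one ending exactly at the end of
-- the stream, A returns 0 (its range stops at len(stream)-1 and never examines the final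
-- window) while B returns len(stream), the intended marker position.
def D_process (stream : String) : Prop :=
  (winD stream.toList stream.toList.length).Nodup ∧
  14 ≤ stream.toList.length ∧
  (∀ e < stream.toList.length, 14 ≤ e → ¬ (winD stream.toList e).Nodup)
instance (stream : String) : Decidable (D_process stream) := by unfold D_process; infer_instance

def Spec_process (stream : String) (out : Int) : Prop := ¬ D_process stream → out = process_alt stream
instance (stream : String) (out : Int) : Decidable (Spec_process stream out) := by unfold Spec_process; infer_instance

def pvDiffWitness_process : String := "abcdefghijklmn"
def pvDiffWitnessOut_process : Int × Int := (0, 14)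

-- ===== CLAIM (what is proved, stated in full; the proofs are below) =====
def Claim_unchanged_process : Prop := ∀ (stream : String), Dom_process stream → Spec_process stream (process stream)
def Claim_changed_process : Prop := Dom_process (pvDiffWitness_process) ∧ D_process (pvDiffWitness_process) ∧ process (pvDiffWitness_process) = pvDiffWitnessOut_process.1 ∧ process_alt (pvDiffWitness_process) = pvDiffWitnessOut_process.2 ∧ pvDiffWitnessOut_process.1 ≠ pvDiffWitnessOut_process.2
def Claim_exact_process : Prop := ∀ (stream : String), Dom_process stream → D_process stream → process stream ≠ process_alt stream

-- ===== LEMMAS AND PROOFS =====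

-- `set(w)` keeps a sublist of w
theorem pvFoldlAdd_sublist (xs s : List Char) : List.Sublist (xs.foldl PySem.Set.add s) (s ++ xs) := by
  induction xs generalizing s with
  | nil => simp
  | cons x xs ih =>
    by_cases hc : x ∈ s
    · have hadd : PySem.Set.add s x = s := by simp [PySem.Set.add, PySem.Set.contains, hc]
      rw [List.foldl_cons, hadd]
      exact (ih s).trans (List.Sublist.append_left (List.sublist_cons_self x xs) s)
    · have hadd : PySem.Set.add s x = s ++ [x] := by simp [PySem.Set.add, PySem.Set.contains, hc]
      rw [List.foldl_cons, hadd]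
      simpa using ih (s ++ [x])

theorem pvSet_len_iff (w : List Char) (hw : w.length = 14) :
    (PySem.Set.ofList w).length = 14 ↔ w.Nodup := by
  constructor
  · intro h
    have hsub : List.Sublist (PySem.Set.ofList w) w := by
      simpa [PySem.Set.ofList_eq_foldl] using pvFoldlAdd_sublist w []
    have heq := hsub.eq_of_length (by omega)
    have hn := PySem.Set.nodup_ofList (xs := w)
    rwa [heq] at hn
  · intro h
    rw [PySem.Set.ofList_eq_self_of_nodup w h]; exact hw

theorem pvWin_eq_drop_take (cs : List Char) (e : Nat) (he : 14 ≤ e) :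
    winD cs e = (cs.drop (e - 14)).take 14 := by
  rw [winD, List.drop_take]
  congr 1
  omega

-- one step of the generic window (chars [t, k)) when a new char is appended
theorem pvW_succ (cs : List Char) (t k : Nat) (ht : t ≤ k) (hk : k < cs.length) :
    (cs.take (k+1)).drop t = (cs.take k).drop t ++ [cs[k]] := by
  rw [List.take_succ, List.getElem?_eq_getElem hk]
  rw [List.drop_append_of_le_length (by simp [List.length_take]; omega)]
  simp

theorem pvW_mem (cs : List Char) (t k : Nat) (c : Char) :
    c ∈ (cs.take k).drop t ↔ ∃ j, t ≤ j ∧ j < k ∧ j < cs.length ∧ cs[j]? = some c := by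
  constructor
  · intro h
    obtain ⟨m, hm, hget⟩ := List.mem_iff_getElem.mp h
    have hm' : m < min k cs.length - t := by
      simpa [List.length_drop, List.length_take] using hm
    refine ⟨t + m, by omega, by omega, by omega, ?_⟩
    rw [List.getElem?_eq_getElem (by omega)]
    simp only [List.getElem_drop, List.getElem_take] at hget
    rw [hget]
  · rintro ⟨j, htj, hjk, hjl, hget⟩
    rw [List.getElem?_eq_getElem hjl] at hget
    have hj' : j - t < ((cs.take k).drop t).length := by
      simp [List.length_drop, List.length_take]; omega
    refine List.mem_iff_getElem.mpr ⟨j - t, hj', ?_⟩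
    simp only [List.getElem_drop, List.getElem_take]
    have hj : t + (j - t) = j := by omega
    simp_rw [hj]
    exact Option.some.inj hget

theorem pvNodup_concat (w : List Char) (c : Char) :
    (w ++ [c]).Nodup ↔ w.Nodup ∧ c ∉ w := by
  rw [List.nodup_append]
  constructor
  · rintro ⟨h1, -, h3⟩
    exact ⟨h1, fun hc => h3 c hc c (by simp) rfl⟩
  · rintro ⟨h1, h2⟩
    refine ⟨h1, List.nodup_singleton c, fun a ha b hb => ?_⟩
    rw [List.mem_singleton] at hb
    subst hb
    exact fun h => h2 (h ▸ ha)

theorem pvNotNodup_concat (w : List Char) (c : Char) (h : ¬ w.Nodup) : ¬ (w ++ [c]).Nodup := by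
  rw [pvNodup_concat]; tauto

theorem pvDup_concat (w : List Char) (c : Char) (h : c ∈ w) : ¬ (w ++ [c]).Nodup := by
  rw [pvNodup_concat]; tauto

theorem pvDrop_cons (cs : List Char) (k : Nat) (h : k < cs.length) :
    cs.drop k = cs[k] :: cs.drop (k+1) := by
  induction cs generalizing k with
  | nil => simp at h
  | cons x xs ih =>
    cases k with
    | zero => simp
    | succ k =>
      have hk : k < xs.length := by simpa using h
      simpa using ih k hk

-- last occurrence of c among indices < k
def pvLastOcc (cs : List Char) (k : Nat) (c : Char) : Option Nat :=
  (List.range k).reverse.find? (fun j => decide (cs[j]? = some c))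

theorem pvLastOcc_succ (cs : List Char) (k : Nat) (c : Char) :
    pvLastOcc cs (k+1) c = if cs[k]? = some c then some k else pvLastOcc cs k c := by
  simp only [pvLastOcc, List.range_succ, List.reverse_append, List.reverse_cons,
    List.reverse_nil, List.nil_append, List.cons_append, List.find?_cons]
  split_ifs with h <;> simp_all

theorem pvLastOcc_spec (cs : List Char) (k : Nat) (c : Char) :
    (pvLastOcc cs k c = none → ∀ j < k, cs[j]? ≠ some c) ∧
    (∀ j0, pvLastOcc cs k c = some j0 →
      j0 < k ∧ cs[j0]? = some c ∧ ∀ j', j0 < j' → j' < k → cs[j']? ≠ some c) := by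
  induction k with
  | zero => exact ⟨fun _ j hj => by omega, fun j0 h => by simp [pvLastOcc] at h⟩
  | succ k ih =>
    rw [pvLastOcc_succ]
    by_cases h : cs[k]? = some c
    · simp only [if_pos h]
      refine ⟨fun hn => by simp at hn, fun j0 hj0 => ?_⟩
      injection hj0 with hj0
      subst hj0
      exact ⟨by omega, h, fun j' h1 h2 _ => by omega⟩
    · simp only [if_neg h]
      refine ⟨fun hn j hj => ?_, fun j0 hj0 => ?_⟩
      · rcases Nat.lt_succ_iff_lt_or_eq.mp hj with h' | h'
        · exact ih.1 hn j h'
        · subst h'; exact h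
      · obtain ⟨h1, h2, h3⟩ := ih.2 j0 hj0
        refine ⟨by omega, h2, fun j' hlt hlt' => ?_⟩
        rcases Nat.lt_succ_iff_lt_or_eq.mp hlt' with h' | h'
        · exact h3 j' hlt h'
        · subst h'; exact h

-- loop invariant for B's sliding window
def pvInv (cs : List Char) (k σ : Nat) (seen : PySem.Dict Char Int) : Prop :=
  σ ≤ k ∧ k ≤ cs.length ∧
  ((cs.take k).drop σ).Nodup ∧
  (∀ t, t < σ → ¬ ((cs.take k).drop t).Nodup) ∧
  (∀ c, seen.getD c (-1) = match pvLastOcc cs k c with | some j => (j : Int) | none => -1)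

-- target characterisation: first e in [m, n] whose full 14-window is distinct
def pvFirstFrom (cs : List Char) (m : Nat) : Int :=
  match (List.range' m (cs.length + 1 - m)).find? (fun e => decide (14 ≤ e ∧ (winD cs e).Nodup)) with
  | some e => (e : Int)
  | none => 0

theorem pvDict_step (cs : List Char) (k : Nat) (seen : PySem.Dict Char Int) (hk : k < cs.length)
    (hdict : ∀ c, seen.getD c (-1) = match pvLastOcc cs k c with | some j => (j : Int) | none => -1) :
    ∀ c, (seen.insert cs[k] (k : Int)).getD c (-1) =
      match pvLastOcc cs (k+1) c with | some j => (j : Int) | none => -1 := by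
  intro c
  have hck : cs[k]? = some cs[k] := List.getElem?_eq_getElem hk
  rw [PySem.Dict.getD_insert, pvLastOcc_succ]
  by_cases hc : c = cs[k]
  · subst hc
    simp [hck]
  · rw [if_neg hc, if_neg (fun hsome => hc (Option.some.inj (hsome.symm.trans hck)))]
    exact hdict c

theorem pvInv_step_keep (cs : List Char) (k σ : Nat) (seen : PySem.Dict Char Int)
    (hk : k < cs.length) (hinv : pvInv cs k σ seen)
    (hnotin : ∀ j, σ ≤ j → j < k → cs[j]? ≠ some cs[k]) :
    pvInv cs (k+1) σ (seen.insert cs[k] (k : Int)) := by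
  obtain ⟨hσk, hkn, hnd, hmin, hdict⟩ := hinv
  refine ⟨by omega, by omega, ?_, ?_, pvDict_step cs k seen hk hdict⟩
  · rw [pvW_succ cs σ k hσk hk, pvNodup_concat]
    refine ⟨hnd, fun hmem => ?_⟩
    obtain ⟨j, h1, h2, h3, h4⟩ := (pvW_mem cs σ k cs[k]).mp hmem
    exact hnotin j h1 h2 h4
  · intro t ht
    rw [pvW_succ cs t k (by omega) hk]
    exact pvNotNodup_concat _ _ (hmin t ht)

theorem pvInv_step_move (cs : List Char) (k σ j0 : Nat) (seen : PySem.Dict Char Int)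
    (hk : k < cs.length) (hinv : pvInv cs k σ seen)
    (ho : pvLastOcc cs k cs[k] = some j0) (hj : σ ≤ j0) :
    pvInv cs (k+1) (j0+1) (seen.insert cs[k] (k : Int)) := by
  obtain ⟨hσk, hkn, hnd, hmin, hdict⟩ := hinv
  obtain ⟨hj0k, hj0c, hj0max⟩ := (pvLastOcc_spec cs k cs[k]).2 j0 ho
  refine ⟨by omega, by omega, ?_, ?_, pvDict_step cs k seen hk hdict⟩
  · rw [pvW_succ cs (j0+1) k (by omega) hk, pvNodup_concat]
    constructor
    · have hsub : ((cs.take k).drop (j0+1)) = ((cs.take k).drop σ).drop (j0+1-σ) := by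
        rw [List.drop_drop]
        congr 1
        omega
      rw [hsub]
      exact (List.drop_sublist _ _).nodup hnd
    · intro hmem
      obtain ⟨j, h1, h2, h3, h4⟩ := (pvW_mem cs (j0+1) k cs[k]).mp hmem
      exact hj0max j (by omega) h2 h4
  · intro t ht
    rw [pvW_succ cs t k (by omega) hk]
    by_cases htσ : t < σ
    · exact pvNotNodup_concat _ _ (hmin t htσ)
    · exact pvDup_concat _ _ ((pvW_mem cs t k cs[k]).mpr ⟨j0, by omega, hj0k, by omega, hj0c⟩)

theorem pvAltLoop_cons (c : Char) (rest : List Char) (i : Nat) (start : Int)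
    (seen : PySem.Dict Char Int) :
    processAltLoop (c :: rest) i start seen =
      (if (i : Int) - (if start ≤ seen.getD c (-1) then seen.getD c (-1) + 1 else start) + 1 = 14
       then (i : Int) + 1
       else processAltLoop rest (i + 1)
         (if start ≤ seen.getD c (-1) then seen.getD c (-1) + 1 else start)
         (seen.insert c (i : Int))) := rfl

-- shared continuation: the return test and the recursive call, given the new invariant
theorem pvAfter (cs : List Char) (m k σ σ' : Nat) (seen' : PySem.Dict Char Int)
    (ih : ∀ (k σ : Nat) (seen : PySem.Dict Char Int), cs.length - k ≤ m → pvInv cs k σ seen →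
      k - σ < 14 → processAltLoop (cs.drop k) k (σ : Int) seen = pvFirstFrom cs (k+1))
    (hm : cs.length - k ≤ m + 1) (hklt : k < cs.length) (hσσ' : σ ≤ σ') (hwin : k - σ < 14)
    (hinv' : pvInv cs (k+1) σ' seen') :
    (if (k : Int) - (σ' : Int) + 1 = 14 then (k : Int) + 1
     else processAltLoop (cs.drop (k+1)) (k+1) (σ' : Int) seen') = pvFirstFrom cs (k+1) := by
  obtain ⟨hσ'k, hkn', hnd', hmin', hdict'⟩ := hinv'
  have hrange : cs.length + 1 - (k+1) = (cs.length - (k+1)) + 1 := by omega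
  by_cases hret : k + 1 - σ' = 14
  · rw [if_pos (by omega)]
    simp only [pvFirstFrom]
    rw [hrange, List.range'_succ]
    rw [List.find?_cons_of_pos (by
      refine decide_eq_true ⟨by omega, ?_⟩
      have hs : k + 1 - 14 = σ' := by omega
      rw [winD, hs]
      exact hnd')]
    show (k : Int) + 1 = ((k + 1 : Nat) : Int)
    push_cast
    ring
  · rw [if_neg (by omega)]
    have hwin' : (k+1) - σ' < 14 := by omega
    rw [ih (k+1) σ' seen' (by omega) ⟨hσ'k, hkn', hnd', hmin', hdict'⟩ hwin']
    simp only [pvFirstFrom]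
    rw [hrange, List.range'_succ]
    rw [List.find?_cons_of_neg (by
      intro hp
      obtain ⟨h14, hnod⟩ := of_decide_eq_true hp
      rw [winD] at hnod
      have hge : σ' ≤ k + 1 - 14 := by
        by_contra hlt
        exact hmin' (k+1-14) (by omega) hnod
      omega)]
    have heq : cs.length - (k+1) = cs.length + 1 - (k+2) := by omega
    rw [heq]

theorem pvGo_spec (cs : List Char) (m : Nat) : ∀ (k σ : Nat) (seen : PySem.Dict Char Int),
    cs.length - k ≤ m → pvInv cs k σ seen → k - σ < 14 →
    processAltLoop (cs.drop k) k (σ : Int) seen = pvFirstFrom cs (k+1) := by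
  induction m with
  | zero =>
    intro k σ seen hm hinv _
    have hk : k = cs.length := by
      obtain ⟨-, hkn, -⟩ := hinv
      omega
    subst hk
    rw [List.drop_length]
    simp [processAltLoop, pvFirstFrom]
  | succ m ih =>
    intro k σ seen hm hinv hwin
    rcases Nat.lt_or_ge k cs.length with hklt | hkge
    · have hdrop : cs.drop k = cs[k] :: cs.drop (k+1) := pvDrop_cons cs k hklt
      rw [hdrop, pvAltLoop_cons]
      have hdict := hinv.2.2.2.2
      rcases ho : pvLastOcc cs k cs[k] with _ | j0
      · have hval : seen.getD cs[k] (-1) = -1 := by rw [hdict cs[k], ho]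
        have hstart : (if (σ : Int) ≤ (-1 : Int) then (-1 : Int) + 1 else (σ : Int)) = (σ : Int) :=
          if_neg (by omega)
        rw [hval, hstart]
        exact pvAfter cs m k σ σ _ ih hm hklt (le_refl σ) hwin
          (pvInv_step_keep cs k σ seen hklt hinv
            (fun j hσj hjk hgetj => (pvLastOcc_spec cs k cs[k]).1 ho j hjk hgetj))
      · have hval : seen.getD cs[k] (-1) = (j0 : Int) := by rw [hdict cs[k], ho]
        obtain ⟨hj0k, hj0c, hj0max⟩ := (pvLastOcc_spec cs k cs[k]).2 j0 ho
        by_cases hj : σ ≤ j0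
        · have hstart : (if (σ : Int) ≤ (j0 : Int) then (j0 : Int) + 1 else (σ : Int)) =
              ((j0 + 1 : Nat) : Int) := by
            rw [if_pos (by exact_mod_cast hj)]
            push_cast
            ring
          rw [hval, hstart]
          exact pvAfter cs m k σ (j0+1) _ ih hm hklt (by omega) hwin
            (pvInv_step_move cs k σ j0 seen hklt hinv ho hj)
        · have hstart : (if (σ : Int) ≤ (j0 : Int) then (j0 : Int) + 1 else (σ : Int)) = (σ : Int) :=
            if_neg (by exact_mod_cast hj)
          rw [hval, hstart]
          exact pvAfter cs m k σ σ _ ih hm hklt (le_refl σ) hwin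
            (pvInv_step_keep cs k σ seen hklt hinv
              (fun j hσj hjk hgetj => hj0max j (by omega) hjk hgetj))
    · have hk : k = cs.length := by
        obtain ⟨-, hkn, -⟩ := hinv
        omega
      subst hk
      rw [List.drop_length]
      simp [processAltLoop, pvFirstFrom]

-- find? only depends on the predicate's values on the list
theorem pvFind_congr (l : List Nat) (p q : Nat → Bool) (h : ∀ x ∈ l, p x = q x) :
    l.find? p = l.find? q := by
  induction l with
  | nil => rfl
  | cons x xs ih =>
    rw [List.find?_cons, List.find?_cons, h x (by simp)]
    split
    · rfl
    · exact ih (fun y hy => h y (by simp [hy]))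

theorem pvFirstFrom_one (cs : List Char) :
    pvFirstFrom cs 1 =
      match (List.range' 14 (cs.length + 1 - 14)).find? (fun e => decide ((winD cs e).Nodup)) with
      | some e => (e : Int)
      | none => 0 := by
  simp only [pvFirstFrom]
  rcases Nat.lt_or_ge cs.length 14 with hlt | hge
  · have h1 : (List.range' 1 (cs.length + 1 - 1)).find?
        (fun e => decide (14 ≤ e ∧ (winD cs e).Nodup)) = none := by
      rw [List.find?_eq_none]
      intro x hx
      rw [List.mem_range'_1] at hx
      simp only [decide_eq_true_eq]
      rintro ⟨h14, -⟩
      omega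
    have h2 : cs.length + 1 - 14 = 0 := by omega
    rw [h1, h2]
    simp
  · have hsplit : List.range' 1 (cs.length + 1 - 1) =
        List.range' 1 13 ++ List.range' 14 (cs.length + 1 - 14) := by
      have h := List.range'_append (s := 1) (m := 13) (n := cs.length + 1 - 14) (step := 1)
      norm_num at h
      rw [h]
      congr 1
      omega
    rw [hsplit, List.find?_append]
    have hfirst : (List.range' 1 13).find?
        (fun e => decide (14 ≤ e ∧ (winD cs e).Nodup)) = none := by
      rw [List.find?_eq_none]
      intro x hx
      rw [List.mem_range'_1] at hx
      simp only [decide_eq_true_eq]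
      rintro ⟨h14, -⟩
      omega
    rw [hfirst, Option.none_or]
    rw [pvFind_congr (List.range' 14 (cs.length + 1 - 14))
      (fun e => decide (14 ≤ e ∧ (winD cs e).Nodup))
      (fun e => decide ((winD cs e).Nodup))
      (fun x hx => by
        rw [List.mem_range'_1] at hx
        have h14 : 14 ≤ x := hx.1
        simp [h14])]

theorem pvB_char (stream : String) :
    process_alt stream =
      match (List.range' 14 (stream.toList.length + 1 - 14)).find?
          (fun e => decide ((winD stream.toList e).Nodup)) with
      | some e => (e : Int)
      | none => 0 := by
  have hinv0 : pvInv stream.toList 0 0 PySem.Dict.empty := by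
    refine ⟨le_refl 0, by omega, by simp, fun t ht => by omega, fun c => ?_⟩
    rw [PySem.Dict.getD_empty]
    have h0 : pvLastOcc stream.toList 0 c = none := by simp [pvLastOcc]
    rw [h0]
  have hgo := pvGo_spec stream.toList stream.toList.length 0 0 PySem.Dict.empty
    (by omega) hinv0 (by omega)
  rw [List.drop_zero, Nat.cast_zero] at hgo
  show processAltLoop stream.toList 0 0 PySem.Dict.empty = _
  rw [hgo]
  exact pvFirstFrom_one stream.toList

theorem pvA_loop (cs : List Char) (m : Nat) : ∀ (a : Nat), cs.length - a ≤ m → 14 ≤ a →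
    processLoop cs (PySem.List.pyRange (a : Int) (cs.length : Int) 1) =
      match (List.range' a (cs.length - a)).find?
          (fun e => decide ((winD cs e).Nodup)) with
      | some e => (e : Int)
      | none => 0 := by
  induction m with
  | zero =>
    intro a hm h14
    have hna : cs.length ≤ a := by omega
    rw [PySem.List.pyRange_one_eq_nil (by exact_mod_cast hna)]
    have h0 : cs.length - a = 0 := by omega
    rw [h0]
    simp [processLoop]
  | succ m ih =>
    intro a hm h14
    rcases Nat.lt_or_ge a cs.length with halt | hage
    · rw [PySem.List.pyRange_one_cons (by exact_mod_cast halt)]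
      simp only [processLoop]
      have hslice : PySem.List.slice cs (some ((a : Int) - 14)) (some (a : Int)) =
          (cs.drop (a - 14)).take 14 := by
        have hc : (a : Int) - 14 = ((a - 14 : Nat) : Int) := by omega
        rw [hc, PySem.List.slice_natCast]
        congr 1
        omega
      rw [hslice]
      have hwlen : ((cs.drop (a - 14)).take 14).length = 14 := by
        rw [List.length_take, List.length_drop]
        omega
      have hwin : winD cs a = (cs.drop (a - 14)).take 14 := pvWin_eq_drop_take cs a h14
      have hrange : cs.length - a = (cs.length - (a + 1)) + 1 := by omega
      rw [hrange, List.range'_succ]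
      by_cases hnod : ((cs.drop (a - 14)).take 14).Nodup
      · rw [if_pos ((pvSet_len_iff _ hwlen).mpr hnod)]
        rw [List.find?_cons_of_pos (p := fun e => decide ((winD cs e).Nodup)) (by
          simp only [decide_eq_true_eq]
          rw [hwin]
          exact hnod)]
      · rw [if_neg (fun h => hnod ((pvSet_len_iff _ hwlen).mp h))]
        rw [List.find?_cons_of_neg (p := fun e => decide ((winD cs e).Nodup)) (by
          simp only [decide_eq_true_eq]
          rw [hwin]
          exact hnod)]
        have hcast : (a : Int) + 1 = ((a + 1 : Nat) : Int) := by push_cast; ring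
        rw [hcast, ih (a + 1) (by omega) (by omega)]
    · rw [PySem.List.pyRange_one_eq_nil (by exact_mod_cast hage)]
      have h0 : cs.length - a = 0 := by omega
      rw [h0]
      simp [processLoop]

theorem pvA_char (stream : String) :
    process stream =
      match (List.range' 14 (stream.toList.length - 14)).find?
          (fun e => decide ((winD stream.toList e).Nodup)) with
      | some e => (e : Int)
      | none => 0 := by
  show processLoop stream.toList (PySem.List.pyRange 14 (PySem.Str.len stream) 1) = _
  rw [PySem.Str.len_eq]
  exact pvA_loop stream.toList stream.toList.length 14 (by omega) (by omega)

-- ===== VERDICT (by name: the statement is the Claim_ definition above) =====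
theorem process_spec : Claim_unchanged_process := by
  intro stream _
  unfold Spec_process
  intro hD
  rw [pvA_char, pvB_char]
  rcases Nat.lt_or_ge stream.toList.length 14 with hlt | hge
  · have h1 : stream.toList.length - 14 = 0 := by omega
    have h2 : stream.toList.length + 1 - 14 = 0 := by omega
    rw [h1, h2]
  · have hsplit : stream.toList.length + 1 - 14 = (stream.toList.length - 14) + 1 := by omega
    rw [hsplit, List.range'_1_concat]
    have hend : 14 + (stream.toList.length - 14) = stream.toList.length := by omega
    rw [hend, List.find?_append]
    rcases hFA : (List.range' 14 (stream.toList.length - 14)).find?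
        (fun e => decide ((winD stream.toList e).Nodup)) with _ | e
    · rw [Option.none_or]
      by_cases hq : (winD stream.toList stream.toList.length).Nodup
      · exfalso
        apply hD
        unfold D_process
        refine ⟨hq, hge, fun e he h14e => ?_⟩
        have hnone := List.find?_eq_none.mp hFA e (by rw [List.mem_range'_1]; omega)
        simpa using hnone
      · rw [List.find?_cons_of_neg (p := fun e => decide ((winD stream.toList e).Nodup)) (by
          simp only [decide_eq_true_eq]
          exact hq)]
        rfl
    · rfl

theorem process_changed : Claim_changed_process := by
  unfold Claim_changed_process
  decide

theorem process_tight : Claim_exact_process := by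
  intro stream _ hD
  obtain ⟨hnod, h14, hall⟩ := hD
  rw [pvA_char, pvB_char]
  have hFA : (List.range' 14 (stream.toList.length - 14)).find?
      (fun e => decide ((winD stream.toList e).Nodup)) = none := by
    rw [List.find?_eq_none]
    intro x hx
    rw [List.mem_range'_1] at hx
    simp only [decide_eq_true_eq]
    exact hall x (by omega) (by omega)
  have hsplit : stream.toList.length + 1 - 14 = (stream.toList.length - 14) + 1 := by omega
  rw [hsplit, List.range'_1_concat]
  have hend : 14 + (stream.toList.length - 14) = stream.toList.length := by omega
  rw [hend, List.find?_append, hFA, Option.none_or]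
  rw [List.find?_cons_of_pos (p := fun e => decide ((winD stream.toList e).Nodup)) (by
    simp only [decide_eq_true_eq]
    exact hnod)]
  intro h
  have h0 : (0 : Int) = (stream.toList.length : Int) := h
  omega
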